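-- pv_equiv track=rewrite | github.com/Simeon-JAA/scrabble-technical-assessment | main.py | highest_score_for_word_with_triplet
-- ===== SOURCE A (Python) =====
-- def highest_score_for_word_with_triplet(word: str) -> int:
--     """Return the score of the word"""
--
--     word = list(word.upper())
--
--     letter_group_allocation = {"EAIONRTLSU" : 1,
--                         "DG": 2,
--                         "BCMP": 3,
--                         "FHVWY": 4,
--                         "K": 5,
--                         "JX": 8,
--                         "QZ": 10
--                         }
--
--     list_of_possible_points = []
--
--     for index, _ in enumerate(word):
--         total_points = 0
--         word_copy = word.copy()
--         word_copy[index] = word_copy[index].lower()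
--         for l in word_copy:
--             if l.islower():
--                 l = l.upper()
--                 for letter_group in letter_group_allocation.keys():
--                     if l in letter_group:
--                         total_points += 3 * letter_group_allocation[letter_group]
--             else:
--                 for letter_group in letter_group_allocation.keys():
--                     if l in letter_group:
--                         total_points += letter_group_allocation[letter_group]
--         list_of_possible_points.append(total_points)
--
--     return max(list_of_possible_points)
-- ===== SOURCE B (Python) =====
-- def highest_score_for_word_with_triplet(word: str) -> int:
--     """Return the score of the word"""
--
--     letter_group_allocation = {"EAIONRTLSU": 1,
--                                "DG": 2,
--                                "BCMP": 3,
--                                "FHVWY": 4,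
--                                "K": 5,
--                                "JX": 8,
--                                "QZ": 10
--                                }
--
--     def letter_points(ch):
--         pts = 0
--         for group, value in letter_group_allocation.items():
--             if ch in group:
--                 pts += value
--         return pts
--
--     values = [letter_points(ch) for ch in word.upper()]
--     return sum(values) + 2 * max(values)
-- ===== Notes on version B (the rewrite author's own statement) =====
-- stated objective: faster
-- what changed: Instead of rebuilding the word and rescoring all letters once per index (quadratic), B scores each letter once and returns base sum plus twice the maximum letter value in a single pass.
import Mathlib
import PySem

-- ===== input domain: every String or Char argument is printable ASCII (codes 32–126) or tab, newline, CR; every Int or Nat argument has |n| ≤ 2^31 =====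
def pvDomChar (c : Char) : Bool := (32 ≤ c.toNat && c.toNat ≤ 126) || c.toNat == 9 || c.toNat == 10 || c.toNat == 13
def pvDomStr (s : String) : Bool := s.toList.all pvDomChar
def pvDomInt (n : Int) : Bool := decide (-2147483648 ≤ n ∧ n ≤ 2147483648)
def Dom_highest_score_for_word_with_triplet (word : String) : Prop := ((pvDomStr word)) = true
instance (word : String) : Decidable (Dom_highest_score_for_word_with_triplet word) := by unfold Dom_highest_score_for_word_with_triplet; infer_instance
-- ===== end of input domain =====

-- B replaces A's quadratic rescoring of a modified copy of the word per index by one pass: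
-- score every letter once, answer = sum of letter values + 2 * maximum letter value.


-- ===== PORT A =====
-- letter_group_allocation as an (insertion-ordered) association list; iterating the dict's
-- keys and looking each key up is iterating these pairs.
def pvGroups : List (List Char × Int) :=
  [(['E','A','I','O','N','R','T','L','S','U'], 1), (['D','G'], 2), (['B','C','M','P'], 3),
   (['F','H','V','W','Y'], 4), (['K'], 5), (['J','X'], 8), (['Q','Z'], 10)]

def highest_score_for_word_with_triplet (word : String) : Int :=
  -- word = list(word.upper())
  let w := PySem.Chars.upper word.toList
  -- for index, _ in enumerate(word): …
  let list_of_possible_points :=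
    (PySem.List.enumerate w 0).foldl (fun acc iw =>
      -- word_copy = word.copy(); word_copy[index] = word_copy[index].lower()
      let word_copy := PySem.List.pySetD w iw.1 (PySem.Chars.lowerChar (PySem.List.pyGetD w iw.1 ' '))
      let total_points := word_copy.foldl (fun tp l =>
        if PySem.Chars.islower l then
          -- l = l.upper(); 'l in letter_group' on a 1-char l is exactly char membership
          let l' := PySem.Chars.upperChar l
          pvGroups.foldl (fun tp' gv => if l' ∈ gv.1 then tp' + 3 * gv.2 else tp') tp
        else
          pvGroups.foldl (fun tp' gv => if l ∈ gv.1 then tp' + gv.2 else tp') tp) 0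
      acc ++ [total_points]) []
  -- max(list) raises ValueError on []; the empty word is excluded by Pre_
  (PySem.List.max? list_of_possible_points (fun x => x)).getD 0

-- ===== PORT B =====
def pvAltGroups : List (List Char × Int) :=
  [(['E','A','I','O','N','R','T','L','S','U'], 1), (['D','G'], 2), (['B','C','M','P'], 3),
   (['F','H','V','W','Y'], 4), (['K'], 5), (['J','X'], 8), (['Q','Z'], 10)]

-- letter_points(ch): 'ch in group' on a 1-char ch is exactly char membership
def pvLetterPoints (ch : Char) : Int :=
  pvAltGroups.foldl (fun pts gv => if ch ∈ gv.1 then pts + gv.2 else pts) 0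

def highest_score_for_word_with_triplet_alt (word : String) : Int :=
  let values := (PySem.Chars.upper word.toList).map pvLetterPoints
  -- max(values) raises ValueError on []; the empty word is excluded by Pre_
  values.sum + 2 * ((PySem.List.max? values (fun x => x)).getD 0)

-- ===== PRECONDITION & SPEC =====
-- Pre_ excludes only the empty word, on which Python's max([]) raises ValueError in both A and B.
def Pre_highest_score_for_word_with_triplet (word : String) : Prop := word ≠ ""
instance (word : String) : Decidable (Pre_highest_score_for_word_with_triplet word) := by unfold Pre_highest_score_for_word_with_triplet; infer_instance
def pvWitness_highest_score_for_word_with_triplet : String := "Quartz!"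

def Spec_highest_score_for_word_with_triplet (word : String) (out : Int) : Prop := out = highest_score_for_word_with_triplet_alt word
instance (word : String) (out : Int) : Decidable (Spec_highest_score_for_word_with_triplet word out) := by unfold Spec_highest_score_for_word_with_triplet; infer_instance

-- ===== CLAIM (what is proved, stated in full; the proofs are below) =====
def Claim_equal_highest_score_for_word_with_triplet : Prop := ∀ (word : String), Dom_highest_score_for_word_with_triplet word → Pre_highest_score_for_word_with_triplet word → Spec_highest_score_for_word_with_triplet word (highest_score_for_word_with_triplet word)

-- ===== LEMMAS AND PROOFS =====

-- what one character contributes to A's inner loop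
def pvContrib (c : Char) : Int :=
  if PySem.Chars.islower c then 3 * pvLetterPoints (PySem.Chars.upperChar c) else pvLetterPoints c

-- group scans as sums
theorem pv_scan1 (gs : List (List Char × Int)) (l : Char) :
    ∀ tp : Int, gs.foldl (fun t gv => if l ∈ gv.1 then t + gv.2 else t) tp
      = tp + (gs.map (fun gv => if l ∈ gv.1 then gv.2 else 0)).sum := by
  induction gs with
  | nil => simp
  | cons g gs ih =>
      intro tp
      simp only [List.foldl_cons, List.map_cons, List.sum_cons]
      rw [ih]
      split_ifs <;> ring

theorem pv_scan3 (gs : List (List Char × Int)) (l : Char) :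
    ∀ tp : Int, gs.foldl (fun t gv => if l ∈ gv.1 then t + 3 * gv.2 else t) tp
      = tp + 3 * (gs.map (fun gv => if l ∈ gv.1 then gv.2 else 0)).sum := by
  induction gs with
  | nil => simp
  | cons g gs ih =>
      intro tp
      simp only [List.foldl_cons, List.map_cons, List.sum_cons]
      rw [ih]
      split_ifs <;> ring

theorem pv_letterPoints_sum (c : Char) :
    pvLetterPoints c = (pvAltGroups.map (fun gv => if c ∈ gv.1 then gv.2 else 0)).sum := by
  simpa using pv_scan1 pvAltGroups c 0

-- A's inner character loop sums the contributions
theorem pv_inner_sum (l : List Char) :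
    ∀ tp : Int,
      l.foldl (fun tp l =>
        if PySem.Chars.islower l then
          let l' := PySem.Chars.upperChar l
          pvGroups.foldl (fun tp' gv => if l' ∈ gv.1 then tp' + 3 * gv.2 else tp') tp
        else
          pvGroups.foldl (fun tp' gv => if l ∈ gv.1 then tp' + gv.2 else tp') tp) tp
      = tp + (l.map pvContrib).sum := by
  induction l with
  | nil => simp
  | cons c l ih =>
      intro tp
      simp only [List.foldl_cons, List.map_cons, List.sum_cons]
      rw [ih]
      have hGG : pvAltGroups = pvGroups := rfl
      unfold pvContrib
      by_cases h : PySem.Chars.islower c = true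
      · rw [if_pos h, if_pos h]
        show pvGroups.foldl _ tp + _ = _
        rw [pv_scan3, pv_letterPoints_sum, hGG]
        ring
      · rw [if_neg h, if_neg h, pv_scan1, pv_letterPoints_sum, hGG]
        ring

theorem pv_le_iff (a b : Char) : a ≤ b ↔ a.toNat ≤ b.toNat := ⟨fun h => h, fun h => h⟩

theorem pv_ofNat_toNat (c : Char) : Char.ofNat c.toNat = c := by
  rcases c with ⟨v, hv⟩
  unfold Char.ofNat
  split
  · next h =>
      apply Char.ext
      simp [Char.ofNatAux]
  · next h => exact absurd hv h

theorem pv_islower_toNat (c : Char) : PySem.Chars.islower c = decide (97 ≤ c.toNat ∧ c.toNat ≤ 122) := by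
  simp [PySem.Chars.islower, pv_le_iff]

theorem pv_isupper_toNat (c : Char) : PySem.Chars.isupper c = decide (65 ≤ c.toNat ∧ c.toNat ≤ 90) := by
  simp [PySem.Chars.isupper, pv_le_iff]

theorem pv_toNat_ofNat (n : Nat) (h : n < 55296) : (Char.ofNat n).toNat = n := by
  unfold Char.ofNat
  split
  · rfl
  · omega

-- an upper-cased character is never lowercase
theorem pv_islower_upperChar (d : Char) :
    PySem.Chars.islower (PySem.Chars.upperChar d) = false := by
  unfold PySem.Chars.upperChar
  by_cases hl : PySem.Chars.islower d = true
  · rw [if_pos hl]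
    rw [pv_islower_toNat] at hl ⊢
    simp at hl ⊢
    rw [pv_toNat_ofNat _ (by omega)]
    omega
  · rw [if_neg hl]
    rw [pv_islower_toNat] at hl ⊢
    simp at hl ⊢
    omega

-- a character that is not an uppercase letter scores 0
theorem pv_letterPoints_zero (c : Char) (hc : ¬(65 ≤ c.toNat ∧ c.toNat ≤ 90)) :
    pvLetterPoints c = 0 := by
  have key : ∀ x : Char, 65 ≤ x.toNat → x.toNat ≤ 90 → ¬(c = x) :=
    fun x h1 h2 e => hc (by rw [e]; exact ⟨h1, h2⟩)
  simp [pvLetterPoints, pvAltGroups,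
    key 'E' (by decide) (by decide), key 'A' (by decide) (by decide),
    key 'I' (by decide) (by decide), key 'O' (by decide) (by decide),
    key 'N' (by decide) (by decide), key 'R' (by decide) (by decide),
    key 'T' (by decide) (by decide), key 'L' (by decide) (by decide),
    key 'S' (by decide) (by decide), key 'U' (by decide) (by decide),
    key 'D' (by decide) (by decide), key 'G' (by decide) (by decide),
    key 'B' (by decide) (by decide), key 'C' (by decide) (by decide),
    key 'M' (by decide) (by decide), key 'P' (by decide) (by decide),
    key 'F' (by decide) (by decide), key 'H' (by decide) (by decide),
    key 'V' (by decide) (by decide), key 'W' (by decide) (by decide),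
    key 'Y' (by decide) (by decide), key 'K' (by decide) (by decide),
    key 'J' (by decide) (by decide), key 'X' (by decide) (by decide),
    key 'Q' (by decide) (by decide), key 'Z' (by decide) (by decide)]

-- the contribution of an already-uppercased character is its letter value
theorem pv_contrib_upper (d : Char) :
    pvContrib (PySem.Chars.upperChar d) = pvLetterPoints (PySem.Chars.upperChar d) := by
  simp [pvContrib, pv_islower_upperChar]

-- the contribution of the lowered copy of an uppercased character is 3× its letter value
theorem pv_contrib_lower (d : Char) :
    pvContrib (PySem.Chars.lowerChar (PySem.Chars.upperChar d))
      = 3 * pvLetterPoints (PySem.Chars.upperChar d) := by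
  have hlow := pv_islower_upperChar d
  set c := PySem.Chars.upperChar d with hc
  unfold PySem.Chars.lowerChar
  by_cases hu : PySem.Chars.isupper c = true
  · rw [if_pos hu]
    rw [pv_isupper_toNat] at hu
    simp at hu
    have ht : (Char.ofNat (c.toNat + 32)).toNat = c.toNat + 32 := pv_toNat_ofNat _ (by omega)
    have hl : PySem.Chars.islower (Char.ofNat (c.toNat + 32)) = true := by
      rw [pv_islower_toNat, ht]
      simp
      omega
    unfold pvContrib
    rw [if_pos hl]
    have hup : PySem.Chars.upperChar (Char.ofNat (c.toNat + 32)) = c := by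
      unfold PySem.Chars.upperChar
      rw [if_pos hl, ht]
      simpa using pv_ofNat_toNat c
    rw [hup]
  · rw [if_neg hu]
    unfold pvContrib
    rw [if_neg (by simp [hlow])]
    have h0 : pvLetterPoints c = 0 := by
      apply pv_letterPoints_zero
      rw [pv_isupper_toNat] at hu
      simpa using hu
    rw [h0]
    ring

-- running max commutes with the affine map x ↦ S + 2x
theorem pv_foldl_max_affine (S : Int) (t : List Int) :
    ∀ a : Int, (t.map (fun x => S + 2 * x)).foldl max (S + 2 * a) = S + 2 * t.foldl max a := by
  induction t with
  | nil => simp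
  | cons x t ih =>
      intro a
      simp only [List.map_cons, List.foldl_cons]
      rw [show max (S + 2 * a) (S + 2 * x) = S + 2 * max a x by
        rcases le_total a x with h | h <;> simp [max_def] <;> omega]
      exact ih (max a x)

-- a loop over enumerate(w) whose body uses only the index is a loop over range(len(w))
theorem pv_map_enum {α β : Type} (g : Int → β) (l : List α) :
    (PySem.List.enumerate l 0).map (fun iw => g iw.1)
      = (PySem.List.pyRange 0 (l.length : Int) 1).map g := by
  rw [show (fun iw : Int × α => g iw.1) = g ∘ Prod.fst from rfl, ← List.map_map,
    PySem.List.map_fst_enumerate]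
  norm_num

-- A's inner loop over the word with position k lowered = base sum + 2 × that letter's value
theorem pv_total_set (w : List Char) (hw : ∀ x ∈ w, ∃ d, x = PySem.Chars.upperChar d)
    (k : Nat) (hk : k < w.length) :
    (w.set k (PySem.Chars.lowerChar w[k])).foldl (fun tp l =>
        if PySem.Chars.islower l then
          let l' := PySem.Chars.upperChar l
          pvGroups.foldl (fun tp' gv => if l' ∈ gv.1 then tp' + 3 * gv.2 else tp') tp
        else
          pvGroups.foldl (fun tp' gv => if l ∈ gv.1 then tp' + gv.2 else tp') tp) 0
      = (w.map pvLetterPoints).sum + 2 * pvLetterPoints w[k] := by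
  rw [pv_inner_sum]
  have hmapc : ∀ l : List Char, (∀ x ∈ l, x ∈ w) → (l.map pvContrib).sum = (l.map pvLetterPoints).sum := by
    intro l hl
    congr 1
    apply List.map_congr_left
    intro x hx
    obtain ⟨d, rfl⟩ := hw x (hl x hx)
    exact pv_contrib_upper d
  have hset : w.set k (PySem.Chars.lowerChar w[k])
      = w.take k ++ PySem.Chars.lowerChar w[k] :: w.drop (k + 1) := by
    rw [List.set_eq_take_append_cons_drop, if_pos hk]
  have hself : w = w.take k ++ w[k] :: w.drop (k + 1) := by
    conv_lhs => rw [← List.take_append_drop k w]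
    rw [List.getElem_cons_drop hk]
  have hck : pvContrib (PySem.Chars.lowerChar w[k]) = 3 * pvLetterPoints w[k] := by
    obtain ⟨d, hd⟩ := hw w[k] (w.getElem_mem hk)
    rw [hd]
    exact pv_contrib_lower d
  have hsum : (w.map pvLetterPoints).sum
      = ((w.take k).map pvLetterPoints).sum + pvLetterPoints w[k]
        + ((w.drop (k + 1)).map pvLetterPoints).sum := by
    conv_lhs => rw [hself]
    simp only [List.map_append, List.sum_append, List.map_cons, List.sum_cons]
    ring
  rw [hset, hsum]
  simp only [List.map_append, List.sum_append, List.map_cons, List.sum_cons]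
  rw [hck, hmapc (w.take k) (fun x hx => List.mem_of_mem_take hx),
      hmapc (w.drop (k + 1)) (fun x hx => List.mem_of_mem_drop hx)]
  ring

-- ===== VERDICT (by name: the statement is the Claim_ definition above) =====
theorem highest_score_for_word_with_triplet_spec : Claim_equal_highest_score_for_word_with_triplet := by
  intro word hdom hpre
  unfold Spec_highest_score_for_word_with_triplet
  unfold highest_score_for_word_with_triplet highest_score_for_word_with_triplet_alt
  simp only []
  set w := PySem.Chars.upper word.toList with hwdef
  have hw : ∀ x ∈ w, ∃ d, x = PySem.Chars.upperChar d := by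
    intro x hx
    rw [hwdef, PySem.Chars.upper] at hx
    obtain ⟨d, _, rfl⟩ := List.mem_map.mp hx
    exact ⟨d, rfl⟩
  set S := (w.map pvLetterPoints).sum with hS
  rw [PySem.List.foldl_append_singleton_eq_map]
  rw [pv_map_enum (g := fun i =>
    List.foldl
      (fun tp l =>
        if PySem.Chars.islower l = true then
          List.foldl (fun tp' gv => if PySem.Chars.upperChar l ∈ gv.1 then tp' + 3 * gv.2 else tp') tp
            pvGroups
        else List.foldl (fun tp' gv => if l ∈ gv.1 then tp' + gv.2 else tp') tp pvGroups)
      0 (PySem.List.pySetD w i (PySem.Chars.lowerChar (PySem.List.pyGetD w i ' '))))]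
  have hcongr : List.map
      (fun i =>
        List.foldl
          (fun tp l =>
            if PySem.Chars.islower l = true then
              List.foldl (fun tp' gv => if PySem.Chars.upperChar l ∈ gv.1 then tp' + 3 * gv.2 else tp') tp
                pvGroups
            else List.foldl (fun tp' gv => if l ∈ gv.1 then tp' + gv.2 else tp') tp pvGroups)
          0 (PySem.List.pySetD w i (PySem.Chars.lowerChar (PySem.List.pyGetD w i ' '))))
      (PySem.List.pyRange 0 (w.length : Int) 1)
      = List.map (fun i => S + 2 * pvLetterPoints (PySem.List.pyGetD w i ' '))
          (PySem.List.pyRange 0 (w.length : Int) 1) := by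
    apply List.map_congr_left
    intro i hi
    rw [PySem.List.mem_pyRange_one] at hi
    have h0 : (0 : Int) ≤ i := hi.1
    have h1 : i < (w.length : Int) := hi.2
    have hk : i.toNat < w.length := by omega
    rw [PySem.List.pySetD_of_nonneg w _ h0, PySem.List.pyGetD_eq_getElem w ' ' h0 h1]
    exact pv_total_set w hw i.toNat hk
  rw [hcongr]
  rw [show (fun i => S + 2 * pvLetterPoints (PySem.List.pyGetD w i ' '))
        = (fun c => S + 2 * pvLetterPoints c) ∘ (fun j => PySem.List.pyGetD w j ' ') from rfl,
    ← List.map_map, PySem.List.map_pyGetD_pyRange_zero']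
  have hwne : w ≠ [] := by
    intro h
    apply hpre
    apply String.toList_eq_nil_iff.mp
    rw [hwdef, PySem.Chars.upper] at h
    exact List.map_eq_nil_iff.mp h
  obtain ⟨v, t, hvt⟩ : ∃ v t, w.map pvLetterPoints = v :: t := by
    cases hE : w.map pvLetterPoints with
    | nil => exact absurd (List.map_eq_nil_iff.mp hE) hwne
    | cons v t => exact ⟨v, t, rfl⟩
  rw [show w.map (fun c => S + 2 * pvLetterPoints c)
        = (w.map pvLetterPoints).map (fun v => S + 2 * v) by rw [List.map_map]; rfl]
  rw [hvt, List.map_cons, List.nil_append, PySem.List.max?_id_cons, PySem.List.max?_id_cons]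
  simp only [Option.getD_some]
  rw [pv_foldl_max_affine]
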